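-- pv_equiv track=rewrite | github.com/rahidz/oeis-offline-matcher | src/oeis_matcher/storage.py | _first_diff_sign
-- ===== SOURCE A (Python) =====
-- def _first_diff_sign(values: list[int]) -> str:
--     if len(values) < 2:
--         return "na"
--     diffs = [values[i + 1] - values[i] for i in range(len(values) - 1)]
--     pos = sum(1 for d in diffs if d > 0)
--     neg = sum(1 for d in diffs if d < 0)
--     zero = len(diffs) - pos - neg
--     if pos == len(diffs):
--         return "pos"
--     if neg == len(diffs):
--         return "neg"
--     if pos > 0 and neg == 0:
--         return "nonneg"
--     if neg > 0 and pos == 0: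
--         return "nonpos"
--     if zero == len(diffs):
--         return "flat"
--     return "mixed"
-- ===== SOURCE B (Python) =====
-- def _first_diff_sign(values: list[int]) -> str:
--     if len(values) < 2:
--         return "na"
--     signs = frozenset((b > a) - (b < a) for a, b in zip(values, values[1:]))
--     table = {
--         frozenset({1}): "pos",
--         frozenset({-1}): "neg",
--         frozenset({1, 0}): "nonneg",
--         frozenset({-1, 0}): "nonpos",
--         frozenset({0}): "flat",
--     }
--     return table.get(signs, "mixed")
-- ===== Notes on version B (the rewrite author's own statement) =====
-- stated objective: simpler
-- what changed: B builds the set of observed difference signs in one pass and classifies by looking that frozenset up in a five-entry table (default 'mixed'), instead of materializing a diffs list, running three counting passes and a six-way comparison chain.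
import Mathlib
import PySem

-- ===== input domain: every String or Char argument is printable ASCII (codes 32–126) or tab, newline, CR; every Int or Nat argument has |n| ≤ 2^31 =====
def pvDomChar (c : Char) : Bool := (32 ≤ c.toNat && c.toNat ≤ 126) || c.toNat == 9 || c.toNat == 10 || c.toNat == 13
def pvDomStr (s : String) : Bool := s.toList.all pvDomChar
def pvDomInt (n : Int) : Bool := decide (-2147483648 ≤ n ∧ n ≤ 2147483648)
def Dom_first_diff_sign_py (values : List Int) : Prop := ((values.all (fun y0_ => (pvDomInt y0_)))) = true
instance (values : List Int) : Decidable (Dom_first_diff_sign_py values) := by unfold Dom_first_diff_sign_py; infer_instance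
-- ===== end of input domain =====

-- B replaces A's intermediate diffs list, three counting passes and six-way comparison
-- chain by one pass collecting the set of difference signs, classified by a table lookup
-- keyed on that set; objective: simpler.


-- ===== PORT A =====
-- indices i and i+1 are always in range, so List.getD is exact for values[i]/values[i+1]
def first_diff_sign_py (values : List Int) : String :=
  if values.length < 2 then "na" else
  let diffs := (List.range (values.length - 1)).map
      (fun i => values.getD (i + 1) 0 - values.getD i 0)
  let pos := diffs.countP (fun d => decide (d > 0))
  let neg := diffs.countP (fun d => decide (d < 0))
  let zcnt := diffs.length - pos - neg
  if pos = diffs.length then "pos"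
  else if neg = diffs.length then "neg"
  else if pos > 0 ∧ neg = 0 then "nonneg"
  else if neg > 0 ∧ pos = 0 then "nonpos"
  else if zcnt = diffs.length then "flat"
  else "mixed"

-- ===== PORT B =====
-- values[1:] is total here, ported as drop 1; the generator feeding frozenset(...) is a
-- foldl of Set.add over the zipped pairs; (b > a) - (b < a) is the two-indicator difference;
-- table.get(signs, "mixed") with frozenset keys is looked up by set equality against the
-- keys in insertion order (exact: at most one key is set-equal to signs).
def first_diff_sign_py_alt (values : List Int) : String :=
  if values.length < 2 then "na" else
  let signs : PySem.Set Int := (values.zip (values.drop 1)).foldl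
      (fun s p => PySem.Set.add s
        ((if p.1 < p.2 then (1 : Int) else 0) - (if p.2 < p.1 then 1 else 0)))
      PySem.Set.empty
  if PySem.Set.equal signs (PySem.Set.ofList [1]) then "pos"
  else if PySem.Set.equal signs (PySem.Set.ofList [-1]) then "neg"
  else if PySem.Set.equal signs (PySem.Set.ofList [1, 0]) then "nonneg"
  else if PySem.Set.equal signs (PySem.Set.ofList [-1, 0]) then "nonpos"
  else if PySem.Set.equal signs (PySem.Set.ofList [0]) then "flat"
  else "mixed"

-- ===== PRECONDITION & SPEC =====
def Spec_first_diff_sign_py (values : List Int) (out : String) : Prop := out = first_diff_sign_py_alt values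
instance (values : List Int) (out : String) : Decidable (Spec_first_diff_sign_py values out) := by unfold Spec_first_diff_sign_py; infer_instance

-- ===== CLAIM (what is proved, stated in full; the proofs are below) =====
def Claim_equal_first_diff_sign_py : Prop := ∀ (values : List Int), Dom_first_diff_sign_py values → Spec_first_diff_sign_py values (first_diff_sign_py values)

-- ===== LEMMAS AND PROOFS =====

-- The index-based diffs list of A equals the zip-based pair list of B, mapped to diffs.
theorem diffs_eq (values : List Int) :
    (List.range (values.length - 1)).map
      (fun i => values.getD (i + 1) 0 - values.getD i 0)
    = (values.zip (values.drop 1)).map (fun p => p.2 - p.1) := by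
  induction values with
  | nil => simp
  | cons a t ih =>
    cases t with
    | nil => simp
    | cons b t' =>
      simp only [List.length_cons, Nat.add_sub_cancel, List.range_succ_eq_map,
        List.map_cons, List.map_map, List.drop_succ_cons, List.drop_zero,
        List.zip_cons_cons]
      refine congrArg₂ List.cons (by simp) ?_
      have h2 := ih
      simp only [List.length_cons, Nat.add_sub_cancel, List.drop_succ_cons,
        List.drop_zero] at h2
      rw [← h2]
      apply List.map_congr_left
      intro i _
      simp [List.getD]

-- Membership in a fold of Set.add.
theorem mem_foldl_add (f : Int × Int → Int) (l : List (Int × Int)) (s0 : PySem.Set Int)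
    (x : Int) :
    (x ∈ l.foldl (fun s p => PySem.Set.add s (f p)) s0) ↔ x ∈ s0 ∨ ∃ p ∈ l, f p = x := by
  induction l generalizing s0 with
  | nil => simp
  | cons q qs ih =>
    simp only [List.foldl_cons, ih, PySem.Set.mem_add, List.mem_cons]
    constructor
    · rintro (⟨h | h⟩ | ⟨p, hp, hfp⟩)
      · exact Or.inl h
      · exact Or.inr ⟨q, Or.inl rfl, h.symm⟩
      · exact Or.inr ⟨p, Or.inr hp, hfp⟩
    · rintro (h | ⟨p, (rfl | hp), hfp⟩)
      · exact Or.inl (Or.inl h)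
      · exact Or.inl (Or.inr hfp.symm)
      · exact Or.inr ⟨p, hp, hfp⟩

-- Set.equal is membership equivalence.
theorem equal_iff_mem (s t : List Int) :
    PySem.Set.equal s t = true ↔ ((∀ x ∈ s, x ∈ t) ∧ ∀ x ∈ t, x ∈ s) := by
  simp [PySem.Set.equal, PySem.Set.issubset, PySem.Set.contains, List.all_eq_true]

-- When both lists draw their elements from {1, -1, 0}, set-equality reduces to the three
-- membership equivalences.
theorem equal_char (s K : List Int)
    (hs : ∀ x ∈ s, x = 1 ∨ x = -1 ∨ x = 0)
    (hK : ∀ x ∈ K, x = 1 ∨ x = -1 ∨ x = 0) :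
    PySem.Set.equal s K = true ↔
      (((1 : Int) ∈ s ↔ (1 : Int) ∈ K) ∧ ((-1 : Int) ∈ s ↔ (-1 : Int) ∈ K) ∧
        ((0 : Int) ∈ s ↔ (0 : Int) ∈ K)) := by
  rw [equal_iff_mem]
  constructor
  · rintro ⟨h1, h2⟩
    exact ⟨⟨fun h => h1 _ h, fun h => h2 _ h⟩, ⟨fun h => h1 _ h, fun h => h2 _ h⟩,
      ⟨fun h => h1 _ h, fun h => h2 _ h⟩⟩
  · rintro ⟨a, b, c⟩
    constructor
    · intro x hx
      rcases hs x hx with rfl | rfl | rfl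
      · exact a.mp hx
      · exact b.mp hx
      · exact c.mp hx
    · intro x hx
      rcases hK x hx with rfl | rfl | rfl
      · exact a.mpr hx
      · exact b.mpr hx
      · exact c.mpr hx

-- B's table lookup over the sign set equals the flag-style classification over the diffs L.
theorem alt_eq_flags (Z : List (Int × Int)) (hZ : Z ≠ []) :
    (if PySem.Set.equal (Z.foldl (fun s p => PySem.Set.add s
            ((if p.1 < p.2 then (1 : Int) else 0) - (if p.2 < p.1 then 1 else 0)))
            PySem.Set.empty) (PySem.Set.ofList [1]) then "pos"
     else if PySem.Set.equal (Z.foldl (fun s p => PySem.Set.add s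
            ((if p.1 < p.2 then (1 : Int) else 0) - (if p.2 < p.1 then 1 else 0)))
            PySem.Set.empty) (PySem.Set.ofList [-1]) then "neg"
     else if PySem.Set.equal (Z.foldl (fun s p => PySem.Set.add s
            ((if p.1 < p.2 then (1 : Int) else 0) - (if p.2 < p.1 then 1 else 0)))
            PySem.Set.empty) (PySem.Set.ofList [1, 0]) then "nonneg"
     else if PySem.Set.equal (Z.foldl (fun s p => PySem.Set.add s
            ((if p.1 < p.2 then (1 : Int) else 0) - (if p.2 < p.1 then 1 else 0)))
            PySem.Set.empty) (PySem.Set.ofList [-1, 0]) then "nonpos"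
     else if PySem.Set.equal (Z.foldl (fun s p => PySem.Set.add s
            ((if p.1 < p.2 then (1 : Int) else 0) - (if p.2 < p.1 then 1 else 0)))
            PySem.Set.empty) (PySem.Set.ofList [0]) then "flat"
     else "mixed")
    =
    (let L := Z.map (fun p => p.2 - p.1)
     if (L.any (fun d => decide (d > 0))) && !(L.any (fun d => decide (d < 0))) then
        (if !(L.any (fun d => decide (d = 0))) then "pos" else "nonneg")
     else if (L.any (fun d => decide (d < 0))) && !(L.any (fun d => decide (d > 0))) then
        (if !(L.any (fun d => decide (d = 0))) then "neg" else "nonpos")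
     else if !(L.any (fun d => decide (d > 0))) && !(L.any (fun d => decide (d < 0))) then "flat"
     else "mixed") := by
  set signs := (Z.foldl (fun s p => PySem.Set.add s
            ((if p.1 < p.2 then (1 : Int) else 0) - (if p.2 < p.1 then 1 else 0)))
            PySem.Set.empty) with hsigns
  have hmem : ∀ x, x ∈ signs ↔ ∃ p ∈ Z,
      ((if p.1 < p.2 then (1 : Int) else 0) - (if p.2 < p.1 then 1 else 0)) = x := by
    intro x
    rw [hsigns, mem_foldl_add]
    simp [PySem.Set.empty]
  have hs : ∀ x ∈ signs, x = 1 ∨ x = -1 ∨ x = 0 := by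
    intro x hx
    obtain ⟨p, _, hp⟩ := (hmem x).mp hx
    split_ifs at hp <;> omega
  have hgp : ∀ p : Int × Int,
      (((if p.1 < p.2 then (1 : Int) else 0) - (if p.2 < p.1 then 1 else 0)) = 1 ↔ p.2 - p.1 > 0) ∧
      (((if p.1 < p.2 then (1 : Int) else 0) - (if p.2 < p.1 then 1 else 0)) = -1 ↔ p.2 - p.1 < 0) ∧
      (((if p.1 < p.2 then (1 : Int) else 0) - (if p.2 < p.1 then 1 else 0)) = 0 ↔ p.2 - p.1 = 0) := by
    intro p
    refine ⟨?_, ?_, ?_⟩ <;> split_ifs <;> omega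
  have h1 : ((1 : Int) ∈ signs) ↔ ∃ p ∈ Z, p.2 - p.1 > 0 := by
    rw [hmem]
    exact ⟨fun ⟨p, hp, h⟩ => ⟨p, hp, ((hgp p).1).mp h⟩,
           fun ⟨p, hp, h⟩ => ⟨p, hp, ((hgp p).1).mpr h⟩⟩
  have hm1 : ((-1 : Int) ∈ signs) ↔ ∃ p ∈ Z, p.2 - p.1 < 0 := by
    rw [hmem]
    exact ⟨fun ⟨p, hp, h⟩ => ⟨p, hp, ((hgp p).2.1).mp h⟩,
           fun ⟨p, hp, h⟩ => ⟨p, hp, ((hgp p).2.1).mpr h⟩⟩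
  have h0 : ((0 : Int) ∈ signs) ↔ ∃ p ∈ Z, p.2 - p.1 = 0 := by
    rw [hmem]
    exact ⟨fun ⟨p, hp, h⟩ => ⟨p, hp, ((hgp p).2.2).mp h⟩,
           fun ⟨p, hp, h⟩ => ⟨p, hp, ((hgp p).2.2).mpr h⟩⟩
  have hany : ∀ (q : Int → Prop) [DecidablePred q],
      ((Z.map (fun p => p.2 - p.1)).any (fun d => decide (q d)) = true ↔
        ∃ p ∈ Z, q (p.2 - p.1)) := by
    intro q _
    simp [List.any_map, Function.comp]
  have hkey : ∀ K : List Int, (∀ x ∈ K, x = 1 ∨ x = -1 ∨ x = 0) →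
      (PySem.Set.equal signs (PySem.Set.ofList K) = true ↔
        (((1 : Int) ∈ signs ↔ (1 : Int) ∈ K) ∧ ((-1 : Int) ∈ signs ↔ (-1 : Int) ∈ K) ∧
          ((0 : Int) ∈ signs ↔ (0 : Int) ∈ K))) := by
    intro K hK
    rw [equal_char signs (PySem.Set.ofList K) hs
      (fun x hx => hK x ((PySem.Set.mem_ofList K x).mp hx))]
    simp [PySem.Set.mem_ofList]
  by_cases ep : ∃ p ∈ Z, p.2 - p.1 > 0 <;>
    by_cases en : ∃ p ∈ Z, p.2 - p.1 < 0 <;>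
      by_cases ez : ∃ p ∈ Z, p.2 - p.1 = 0
  ·
    have b1 : (1 : Int) ∈ signs := h1.mpr ep
    have b2 : (-1 : Int) ∈ signs := hm1.mpr en
    have b3 : (0 : Int) ∈ signs := h0.mpr ez
    have k1 : PySem.Set.equal signs (PySem.Set.ofList [1]) = false :=
      Bool.eq_false_iff.mpr (fun h => (by decide : (-1 : Int) ∉ [1]) ((((hkey [1] (by decide)).mp h).2.1).mp b2))
    have k2 : PySem.Set.equal signs (PySem.Set.ofList [-1]) = false :=
      Bool.eq_false_iff.mpr (fun h => (by decide : (1 : Int) ∉ [-1]) ((((hkey [-1] (by decide)).mp h).1).mp b1))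
    have k3 : PySem.Set.equal signs (PySem.Set.ofList [1, 0]) = false :=
      Bool.eq_false_iff.mpr (fun h => (by decide : (-1 : Int) ∉ [1, 0]) ((((hkey [1, 0] (by decide)).mp h).2.1).mp b2))
    have k4 : PySem.Set.equal signs (PySem.Set.ofList [-1, 0]) = false :=
      Bool.eq_false_iff.mpr (fun h => (by decide : (1 : Int) ∉ [-1, 0]) ((((hkey [-1, 0] (by decide)).mp h).1).mp b1))
    have k5 : PySem.Set.equal signs (PySem.Set.ofList [0]) = false :=
      Bool.eq_false_iff.mpr (fun h => (by decide : (1 : Int) ∉ [0]) ((((hkey [0] (by decide)).mp h).1).mp b1))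
    have f1 : (Z.map (fun p => p.2 - p.1)).any (fun d => decide (d > 0)) = true := (hany (fun d => d > 0)).mpr ep
    have f2 : (Z.map (fun p => p.2 - p.1)).any (fun d => decide (d < 0)) = true := (hany (fun d => d < 0)).mpr en
    have f3 : (Z.map (fun p => p.2 - p.1)).any (fun d => decide (d = 0)) = true := (hany (fun d => d = 0)).mpr ez
    simp only [k1, k2, k3, k4, k5, f1, f2, f3]
    simp
  ·
    have b1 : (1 : Int) ∈ signs := h1.mpr ep
    have b2 : (-1 : Int) ∈ signs := hm1.mpr en
    have b3 : (0 : Int) ∉ signs := fun h => ez (h0.mp h)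
    have k1 : PySem.Set.equal signs (PySem.Set.ofList [1]) = false :=
      Bool.eq_false_iff.mpr (fun h => (by decide : (-1 : Int) ∉ [1]) ((((hkey [1] (by decide)).mp h).2.1).mp b2))
    have k2 : PySem.Set.equal signs (PySem.Set.ofList [-1]) = false :=
      Bool.eq_false_iff.mpr (fun h => (by decide : (1 : Int) ∉ [-1]) ((((hkey [-1] (by decide)).mp h).1).mp b1))
    have k3 : PySem.Set.equal signs (PySem.Set.ofList [1, 0]) = false :=
      Bool.eq_false_iff.mpr (fun h => (by decide : (-1 : Int) ∉ [1, 0]) ((((hkey [1, 0] (by decide)).mp h).2.1).mp b2))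
    have k4 : PySem.Set.equal signs (PySem.Set.ofList [-1, 0]) = false :=
      Bool.eq_false_iff.mpr (fun h => (by decide : (1 : Int) ∉ [-1, 0]) ((((hkey [-1, 0] (by decide)).mp h).1).mp b1))
    have k5 : PySem.Set.equal signs (PySem.Set.ofList [0]) = false :=
      Bool.eq_false_iff.mpr (fun h => (by decide : (1 : Int) ∉ [0]) ((((hkey [0] (by decide)).mp h).1).mp b1))
    have f1 : (Z.map (fun p => p.2 - p.1)).any (fun d => decide (d > 0)) = true := (hany (fun d => d > 0)).mpr ep
    have f2 : (Z.map (fun p => p.2 - p.1)).any (fun d => decide (d < 0)) = true := (hany (fun d => d < 0)).mpr en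
    have f3 : (Z.map (fun p => p.2 - p.1)).any (fun d => decide (d = 0)) = false := Bool.eq_false_iff.mpr (fun h => ez ((hany (fun d => d = 0)).mp h))
    simp only [k1, k2, k3, k4, k5, f1, f2, f3]
    simp
  ·
    have b1 : (1 : Int) ∈ signs := h1.mpr ep
    have b2 : (-1 : Int) ∉ signs := fun h => en (hm1.mp h)
    have b3 : (0 : Int) ∈ signs := h0.mpr ez
    have k1 : PySem.Set.equal signs (PySem.Set.ofList [1]) = false :=
      Bool.eq_false_iff.mpr (fun h => (by decide : (0 : Int) ∉ [1]) ((((hkey [1] (by decide)).mp h).2.2).mp b3))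
    have k2 : PySem.Set.equal signs (PySem.Set.ofList [-1]) = false :=
      Bool.eq_false_iff.mpr (fun h => (by decide : (1 : Int) ∉ [-1]) ((((hkey [-1] (by decide)).mp h).1).mp b1))
    have k3 : PySem.Set.equal signs (PySem.Set.ofList [1, 0]) = true :=
      (hkey [1, 0] (by decide)).mpr ⟨iff_of_true b1 (by decide), iff_of_false b2 (by decide), iff_of_true b3 (by decide)⟩
    have k4 : PySem.Set.equal signs (PySem.Set.ofList [-1, 0]) = false :=
      Bool.eq_false_iff.mpr (fun h => (by decide : (1 : Int) ∉ [-1, 0]) ((((hkey [-1, 0] (by decide)).mp h).1).mp b1))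
    have k5 : PySem.Set.equal signs (PySem.Set.ofList [0]) = false :=
      Bool.eq_false_iff.mpr (fun h => (by decide : (1 : Int) ∉ [0]) ((((hkey [0] (by decide)).mp h).1).mp b1))
    have f1 : (Z.map (fun p => p.2 - p.1)).any (fun d => decide (d > 0)) = true := (hany (fun d => d > 0)).mpr ep
    have f2 : (Z.map (fun p => p.2 - p.1)).any (fun d => decide (d < 0)) = false := Bool.eq_false_iff.mpr (fun h => en ((hany (fun d => d < 0)).mp h))
    have f3 : (Z.map (fun p => p.2 - p.1)).any (fun d => decide (d = 0)) = true := (hany (fun d => d = 0)).mpr ez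
    simp only [k1, k2, k3, k4, k5, f1, f2, f3]
    simp
  ·
    have b1 : (1 : Int) ∈ signs := h1.mpr ep
    have b2 : (-1 : Int) ∉ signs := fun h => en (hm1.mp h)
    have b3 : (0 : Int) ∉ signs := fun h => ez (h0.mp h)
    have k1 : PySem.Set.equal signs (PySem.Set.ofList [1]) = true :=
      (hkey [1] (by decide)).mpr ⟨iff_of_true b1 (by decide), iff_of_false b2 (by decide), iff_of_false b3 (by decide)⟩
    have k2 : PySem.Set.equal signs (PySem.Set.ofList [-1]) = false :=
      Bool.eq_false_iff.mpr (fun h => (by decide : (1 : Int) ∉ [-1]) ((((hkey [-1] (by decide)).mp h).1).mp b1))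
    have k3 : PySem.Set.equal signs (PySem.Set.ofList [1, 0]) = false :=
      Bool.eq_false_iff.mpr (fun h => b3 ((((hkey [1, 0] (by decide)).mp h).2.2).mpr (by decide)))
    have k4 : PySem.Set.equal signs (PySem.Set.ofList [-1, 0]) = false :=
      Bool.eq_false_iff.mpr (fun h => (by decide : (1 : Int) ∉ [-1, 0]) ((((hkey [-1, 0] (by decide)).mp h).1).mp b1))
    have k5 : PySem.Set.equal signs (PySem.Set.ofList [0]) = false :=
      Bool.eq_false_iff.mpr (fun h => (by decide : (1 : Int) ∉ [0]) ((((hkey [0] (by decide)).mp h).1).mp b1))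
    have f1 : (Z.map (fun p => p.2 - p.1)).any (fun d => decide (d > 0)) = true := (hany (fun d => d > 0)).mpr ep
    have f2 : (Z.map (fun p => p.2 - p.1)).any (fun d => decide (d < 0)) = false := Bool.eq_false_iff.mpr (fun h => en ((hany (fun d => d < 0)).mp h))
    have f3 : (Z.map (fun p => p.2 - p.1)).any (fun d => decide (d = 0)) = false := Bool.eq_false_iff.mpr (fun h => ez ((hany (fun d => d = 0)).mp h))
    simp only [k1, k2, k3, k4, k5, f1, f2, f3]
    simp
  ·
    have b1 : (1 : Int) ∉ signs := fun h => ep (h1.mp h)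
    have b2 : (-1 : Int) ∈ signs := hm1.mpr en
    have b3 : (0 : Int) ∈ signs := h0.mpr ez
    have k1 : PySem.Set.equal signs (PySem.Set.ofList [1]) = false :=
      Bool.eq_false_iff.mpr (fun h => b1 ((((hkey [1] (by decide)).mp h).1).mpr (by decide)))
    have k2 : PySem.Set.equal signs (PySem.Set.ofList [-1]) = false :=
      Bool.eq_false_iff.mpr (fun h => (by decide : (0 : Int) ∉ [-1]) ((((hkey [-1] (by decide)).mp h).2.2).mp b3))
    have k3 : PySem.Set.equal signs (PySem.Set.ofList [1, 0]) = false :=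
      Bool.eq_false_iff.mpr (fun h => b1 ((((hkey [1, 0] (by decide)).mp h).1).mpr (by decide)))
    have k4 : PySem.Set.equal signs (PySem.Set.ofList [-1, 0]) = true :=
      (hkey [-1, 0] (by decide)).mpr ⟨iff_of_false b1 (by decide), iff_of_true b2 (by decide), iff_of_true b3 (by decide)⟩
    have k5 : PySem.Set.equal signs (PySem.Set.ofList [0]) = false :=
      Bool.eq_false_iff.mpr (fun h => (by decide : (-1 : Int) ∉ [0]) ((((hkey [0] (by decide)).mp h).2.1).mp b2))
    have f1 : (Z.map (fun p => p.2 - p.1)).any (fun d => decide (d > 0)) = false := Bool.eq_false_iff.mpr (fun h => ep ((hany (fun d => d > 0)).mp h))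
    have f2 : (Z.map (fun p => p.2 - p.1)).any (fun d => decide (d < 0)) = true := (hany (fun d => d < 0)).mpr en
    have f3 : (Z.map (fun p => p.2 - p.1)).any (fun d => decide (d = 0)) = true := (hany (fun d => d = 0)).mpr ez
    simp only [k1, k2, k3, k4, k5, f1, f2, f3]
    simp
  ·
    have b1 : (1 : Int) ∉ signs := fun h => ep (h1.mp h)
    have b2 : (-1 : Int) ∈ signs := hm1.mpr en
    have b3 : (0 : Int) ∉ signs := fun h => ez (h0.mp h)
    have k1 : PySem.Set.equal signs (PySem.Set.ofList [1]) = false :=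
      Bool.eq_false_iff.mpr (fun h => b1 ((((hkey [1] (by decide)).mp h).1).mpr (by decide)))
    have k2 : PySem.Set.equal signs (PySem.Set.ofList [-1]) = true :=
      (hkey [-1] (by decide)).mpr ⟨iff_of_false b1 (by decide), iff_of_true b2 (by decide), iff_of_false b3 (by decide)⟩
    have k3 : PySem.Set.equal signs (PySem.Set.ofList [1, 0]) = false :=
      Bool.eq_false_iff.mpr (fun h => b1 ((((hkey [1, 0] (by decide)).mp h).1).mpr (by decide)))
    have k4 : PySem.Set.equal signs (PySem.Set.ofList [-1, 0]) = false :=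
      Bool.eq_false_iff.mpr (fun h => b3 ((((hkey [-1, 0] (by decide)).mp h).2.2).mpr (by decide)))
    have k5 : PySem.Set.equal signs (PySem.Set.ofList [0]) = false :=
      Bool.eq_false_iff.mpr (fun h => (by decide : (-1 : Int) ∉ [0]) ((((hkey [0] (by decide)).mp h).2.1).mp b2))
    have f1 : (Z.map (fun p => p.2 - p.1)).any (fun d => decide (d > 0)) = false := Bool.eq_false_iff.mpr (fun h => ep ((hany (fun d => d > 0)).mp h))
    have f2 : (Z.map (fun p => p.2 - p.1)).any (fun d => decide (d < 0)) = true := (hany (fun d => d < 0)).mpr en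
    have f3 : (Z.map (fun p => p.2 - p.1)).any (fun d => decide (d = 0)) = false := Bool.eq_false_iff.mpr (fun h => ez ((hany (fun d => d = 0)).mp h))
    simp only [k1, k2, k3, k4, k5, f1, f2, f3]
    simp
  ·
    have b1 : (1 : Int) ∉ signs := fun h => ep (h1.mp h)
    have b2 : (-1 : Int) ∉ signs := fun h => en (hm1.mp h)
    have b3 : (0 : Int) ∈ signs := h0.mpr ez
    have k1 : PySem.Set.equal signs (PySem.Set.ofList [1]) = false :=
      Bool.eq_false_iff.mpr (fun h => b1 ((((hkey [1] (by decide)).mp h).1).mpr (by decide)))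
    have k2 : PySem.Set.equal signs (PySem.Set.ofList [-1]) = false :=
      Bool.eq_false_iff.mpr (fun h => b2 ((((hkey [-1] (by decide)).mp h).2.1).mpr (by decide)))
    have k3 : PySem.Set.equal signs (PySem.Set.ofList [1, 0]) = false :=
      Bool.eq_false_iff.mpr (fun h => b1 ((((hkey [1, 0] (by decide)).mp h).1).mpr (by decide)))
    have k4 : PySem.Set.equal signs (PySem.Set.ofList [-1, 0]) = false :=
      Bool.eq_false_iff.mpr (fun h => b2 ((((hkey [-1, 0] (by decide)).mp h).2.1).mpr (by decide)))
    have k5 : PySem.Set.equal signs (PySem.Set.ofList [0]) = true :=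
      (hkey [0] (by decide)).mpr ⟨iff_of_false b1 (by decide), iff_of_false b2 (by decide), iff_of_true b3 (by decide)⟩
    have f1 : (Z.map (fun p => p.2 - p.1)).any (fun d => decide (d > 0)) = false := Bool.eq_false_iff.mpr (fun h => ep ((hany (fun d => d > 0)).mp h))
    have f2 : (Z.map (fun p => p.2 - p.1)).any (fun d => decide (d < 0)) = false := Bool.eq_false_iff.mpr (fun h => en ((hany (fun d => d < 0)).mp h))
    have f3 : (Z.map (fun p => p.2 - p.1)).any (fun d => decide (d = 0)) = true := (hany (fun d => d = 0)).mpr ez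
    simp only [k1, k2, k3, k4, k5, f1, f2, f3]
    simp
  · exfalso
    obtain ⟨p, hp⟩ := List.exists_mem_of_ne_nil Z hZ
    rcases lt_trichotomy (p.2 - p.1) 0 with h | h | h
    · exact en ⟨p, hp, h⟩
    · exact ez ⟨p, hp, h⟩
    · exact ep ⟨p, hp, h⟩

-- Core classification agreement over the common diffs list L (A's count chain vs the
-- flag-style chain that alt_eq_flags reduces B to).
theorem classify_eq (L : List Int) (hL : L ≠ []) :
    (if L.countP (fun d => decide (d > 0)) = L.length then "pos"
     else if L.countP (fun d => decide (d < 0)) = L.length then "neg"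
     else if L.countP (fun d => decide (d > 0)) > 0 ∧ L.countP (fun d => decide (d < 0)) = 0 then "nonneg"
     else if L.countP (fun d => decide (d < 0)) > 0 ∧ L.countP (fun d => decide (d > 0)) = 0 then "nonpos"
     else if L.length - L.countP (fun d => decide (d > 0)) - L.countP (fun d => decide (d < 0)) = L.length then "flat"
     else "mixed")
    =
    (if (L.any (fun d => decide (d > 0))) && !(L.any (fun d => decide (d < 0))) then
        (if !(L.any (fun d => decide (d = 0))) then "pos" else "nonneg")
     else if (L.any (fun d => decide (d < 0))) && !(L.any (fun d => decide (d > 0))) then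
        (if !(L.any (fun d => decide (d = 0))) then "neg" else "nonpos")
     else if !(L.any (fun d => decide (d > 0))) && !(L.any (fun d => decide (d < 0))) then "flat"
     else "mixed") := by
  have hlen : 0 < L.length := List.length_pos_iff.mpr hL
  have hple : L.countP (fun d => decide (d > 0)) ≤ L.length := L.countP_le_length
  have hnle : L.countP (fun d => decide (d < 0)) ≤ L.length := L.countP_le_length
  have hpz : L.countP (fun d => decide (d > 0)) = 0 ↔ ¬ ∃ x ∈ L, x > 0 := by
    rw [List.countP_eq_zero]; simp
  have hnz : L.countP (fun d => decide (d < 0)) = 0 ↔ ¬ ∃ x ∈ L, x < 0 := by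
    rw [List.countP_eq_zero]; simp
  have hpf : L.countP (fun d => decide (d > 0)) = L.length ↔ ∀ x ∈ L, x > 0 := by
    rw [List.countP_eq_length]; simp
  have hnf : L.countP (fun d => decide (d < 0)) = L.length ↔ ∀ x ∈ L, x < 0 := by
    rw [List.countP_eq_length]; simp
  have hap : L.any (fun d => decide (d > 0)) = true ↔ ∃ x ∈ L, x > 0 := by simp
  have han : L.any (fun d => decide (d < 0)) = true ↔ ∃ x ∈ L, x < 0 := by simp
  have haz : L.any (fun d => decide (d = 0)) = true ↔ ∃ x ∈ L, x = 0 := by simp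
  by_cases ep : ∃ x ∈ L, x > 0 <;> by_cases en : ∃ x ∈ L, x < 0 <;>
    by_cases ez : ∃ x ∈ L, x = 0
  all_goals
    simp only [Bool.and_eq_true, Bool.not_eq_true', ← Bool.not_eq_true] at *
  -- case T T T : both mixed
  · have h1 : L.countP (fun d => decide (d > 0)) ≠ L.length := by
      intro h; obtain ⟨x, hx, hx0⟩ := en; have := hpf.mp h x hx; omega
    have h2 : L.countP (fun d => decide (d < 0)) ≠ L.length := by
      intro h; obtain ⟨x, hx, hx0⟩ := ep; have := hnf.mp h x hx; omega
    have h3 : L.countP (fun d => decide (d > 0)) ≠ 0 := by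
      intro h; exact (hpz.mp h) ep
    have h4 : L.countP (fun d => decide (d < 0)) ≠ 0 := by
      intro h; exact (hnz.mp h) en
    simp [hap.mpr ep, han.mpr en, h1, h2, h3, h4, ep, en]
    try omega
  -- case T T F : both mixed
  · have h1 : L.countP (fun d => decide (d > 0)) ≠ L.length := by
      intro h; obtain ⟨x, hx, hx0⟩ := en; have := hpf.mp h x hx; omega
    have h2 : L.countP (fun d => decide (d < 0)) ≠ L.length := by
      intro h; obtain ⟨x, hx, hx0⟩ := ep; have := hnf.mp h x hx; omega
    have h3 : L.countP (fun d => decide (d > 0)) ≠ 0 := by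
      intro h; exact (hpz.mp h) ep
    have h4 : L.countP (fun d => decide (d < 0)) ≠ 0 := by
      intro h; exact (hnz.mp h) en
    simp [hap.mpr ep, han.mpr en, h1, h2, h3, h4, ep, en]
    try omega
  -- case T F T : nonneg
  · have h1 : L.countP (fun d => decide (d > 0)) ≠ L.length := by
      intro h; obtain ⟨x, hx, hx0⟩ := ez; have := hpf.mp h x hx; omega
    have h2 : L.countP (fun d => decide (d < 0)) ≠ L.length := by
      intro h; obtain ⟨x, hx, hx0⟩ := ep; have := hnf.mp h x hx; omega
    have h3 : L.countP (fun d => decide (d > 0)) ≠ 0 := by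
      intro h; exact (hpz.mp h) ep
    have h4 : L.countP (fun d => decide (d < 0)) = 0 := hnz.mpr en
    have hbn : L.any (fun d => decide (d < 0)) = false := by
      rw [← Bool.not_eq_true]; intro h; exact en (han.mp h)
    simp [hap.mpr ep, hbn, haz.mpr ez, h1, h2, h3, h4, hlen.ne, ep]
    try omega
  -- case T F F : pos (all > 0 by trichotomy)
  · have hall : ∀ x ∈ L, x > 0 := by
      intro x hx
      by_contra h
      rcases lt_or_eq_of_le (not_lt.mp h) with h' | h'
      · exact en ⟨x, hx, h'⟩
      · exact ez ⟨x, hx, h'⟩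
    have h1 : L.countP (fun d => decide (d > 0)) = L.length := hpf.mpr hall
    have hbn : L.any (fun d => decide (d < 0)) = false := by
      rw [← Bool.not_eq_true]; intro h; exact en (han.mp h)
    have hbz : L.any (fun d => decide (d = 0)) = false := by
      rw [← Bool.not_eq_true]; intro h; exact ez (haz.mp h)
    simp [hap.mpr ep, hbn, hbz, h1]
    try omega
  -- case F T T : nonpos
  · have h1 : L.countP (fun d => decide (d > 0)) = 0 := hpz.mpr ep
    have h2 : L.countP (fun d => decide (d < 0)) ≠ L.length := by
      intro h; obtain ⟨x, hx, hx0⟩ := ez; have := hnf.mp h x hx; omega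
    have h4 : L.countP (fun d => decide (d < 0)) ≠ 0 := by
      intro h; exact (hnz.mp h) en
    have hbp : L.any (fun d => decide (d > 0)) = false := by
      rw [← Bool.not_eq_true]; intro h; exact ep (hap.mp h)
    simp [hbp, han.mpr en, haz.mpr ez, h1, h2, h4, hlen.ne, en]
    try omega
  -- case F T F : neg
  · have hall : ∀ x ∈ L, x < 0 := by
      intro x hx
      by_contra h
      rcases lt_or_eq_of_le (not_lt.mp h) with h' | h'
      · exact ep ⟨x, hx, h'⟩
      · exact ez ⟨x, hx, h'.symm⟩
    have h2 : L.countP (fun d => decide (d < 0)) = L.length := hnf.mpr hall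
    have h1 : L.countP (fun d => decide (d > 0)) ≠ L.length := by
      intro h; obtain ⟨x, hx, hx0⟩ := en; have := hpf.mp h x hx; omega
    have hbp : L.any (fun d => decide (d > 0)) = false := by
      rw [← Bool.not_eq_true]; intro h; exact ep (hap.mp h)
    have hbz : L.any (fun d => decide (d = 0)) = false := by
      rw [← Bool.not_eq_true]; intro h; exact ez (haz.mp h)
    simp [hbp, han.mpr en, hbz, h1, h2]
    try omega
  -- case F F T : flat
  · have h1 : L.countP (fun d => decide (d > 0)) = 0 := hpz.mpr ep
    have h2 : L.countP (fun d => decide (d < 0)) = 0 := hnz.mpr en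
    have hbp : L.any (fun d => decide (d > 0)) = false := by
      rw [← Bool.not_eq_true]; intro h; exact ep (hap.mp h)
    have hbn : L.any (fun d => decide (d < 0)) = false := by
      rw [← Bool.not_eq_true]; intro h; exact en (han.mp h)
    simp [hbp, hbn, h1, h2, hlen.ne]
    try omega
  -- case F F F : impossible (L nonempty, trichotomy)
  · exfalso
    obtain ⟨x, hx⟩ := List.exists_mem_of_ne_nil L hL
    rcases lt_trichotomy x 0 with h | h | h
    · exact en ⟨x, hx, h⟩
    · exact ez ⟨x, hx, h⟩
    · exact ep ⟨x, hx, h⟩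

-- ===== VERDICT (by name: the statement is the Claim_ definition above) =====
theorem first_diff_sign_py_spec : Claim_equal_first_diff_sign_py := by
  intro values _
  unfold Spec_first_diff_sign_py first_diff_sign_py first_diff_sign_py_alt
  by_cases h2 : values.length < 2
  · simp [h2]
  · simp only [h2, if_false]
    have hz : values.zip (values.drop 1) ≠ [] := by
      cases values with
      | nil => simp at h2
      | cons a t =>
        cases t with
        | nil => simp at h2
        | cons b t' => simp
    have hL : (values.zip (values.drop 1)).map (fun p => p.2 - p.1) ≠ [] := by
      simpa using hz
    rw [diffs_eq, alt_eq_flags _ hz]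
    exact classify_eq _ hL
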